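-- pv_equiv track=rewrite | github.com/itrujnara/helix_kmer_counter | scripts/extract_seqs.py | extract_seqs
-- ===== SOURCE A (Python) =====
-- import itertools
--
-- def extract_seqs(seq, ints): # separated to limit indentation
--     seqs = []
--     current = ""
--     bpts = list(itertools.chain.from_iterable(ints))
--     write = False
--     for i, c in enumerate(seq): # todo: what indexing in Phobius
--         if (i + 1) in bpts:
--             write = not write # start/stop reading sequence
--             if not write: # save and reset at the end of sequence
--                 seqs.append(current)
--                 current = ""
--         if write:
--             current += c
--     return seqs
-- ===== SOURCE B (Python) =====
-- def extract_seqs(seq, ints):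
--     n = len(seq)
--     pos = sorted({p for iv in ints for p in iv if 1 <= p <= n})
--     out = []
--     rest = pos
--     while len(rest) >= 2:
--         a, b, *rest = rest
--         out.append(seq[a - 1 : b - 1])
--     return out
-- ===== Notes on version B (the rewrite author's own statement) =====
-- stated objective: faster
-- what changed: Replaces the per-character toggle-and-accumulate scan (membership test in the breakpoint list for every character) by computing the sorted set of in-range breakpoints once and slicing the sequence between consecutive breakpoint pairs.
import Mathlib
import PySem

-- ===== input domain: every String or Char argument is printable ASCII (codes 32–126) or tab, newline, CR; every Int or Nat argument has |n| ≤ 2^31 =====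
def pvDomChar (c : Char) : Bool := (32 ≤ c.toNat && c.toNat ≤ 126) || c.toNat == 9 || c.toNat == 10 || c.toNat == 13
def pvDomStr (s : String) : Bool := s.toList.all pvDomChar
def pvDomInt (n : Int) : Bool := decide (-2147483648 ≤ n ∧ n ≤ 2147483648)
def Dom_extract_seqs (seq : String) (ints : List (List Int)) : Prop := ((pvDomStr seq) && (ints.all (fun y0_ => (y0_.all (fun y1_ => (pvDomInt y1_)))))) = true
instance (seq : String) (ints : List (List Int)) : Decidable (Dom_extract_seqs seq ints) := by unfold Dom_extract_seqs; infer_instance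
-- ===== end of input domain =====

-- B replaces A's per-character toggle-and-accumulate scan by sorting the set of
-- in-range breakpoints and slicing between consecutive pairs (objective: simpler).

-- ===== PORT A =====
-- one loop iteration of A: toggle on breakpoint, save-and-reset when toggled off, append char while writing
def stepA (bpts : List Int) (st : List String × List Char × Bool) (ic : Int × Char) : List String × List Char × Bool :=
  let write := if (ic.1 + 1) ∈ bpts then !st.2.2 else st.2.2
  let sc := if (ic.1 + 1) ∈ bpts ∧ write = false then (st.1 ++ [String.ofList st.2.1], ([] : List Char)) else (st.1, st.2.1)
  (sc.1, (if write then sc.2 ++ [ic.2] else sc.2), write)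

def extract_seqs (seq : String) (ints : List (List Int)) : List String :=
  ((PySem.List.enumerate seq.toList 0).foldl (stepA ints.flatten) ([], [], false)).1

-- ===== PORT B =====
-- the while loop of B: peel two breakpoints at a time, slice between them
def pairSlices (cs : List Char) : List Int → List String
  | a :: b :: rest => String.ofList (PySem.List.slice cs (some (a - 1)) (some (b - 1))) :: pairSlices cs rest
  | _ => []

def extract_seqs_alt (seq : String) (ints : List (List Int)) : List String :=
  let n : Int := seq.toList.length
  let pos := PySem.List.sorted (PySem.Set.ofList (ints.flatten.filter (fun p => decide (1 ≤ p) && decide (p ≤ n)))) (fun x => x) false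
  pairSlices seq.toList pos

-- ===== PRECONDITION & SPEC =====
def Spec_extract_seqs (seq : String) (ints : List (List Int)) (out : List String) : Prop := out = extract_seqs_alt seq ints
instance (seq : String) (ints : List (List Int)) (out : List String) : Decidable (Spec_extract_seqs seq ints out) := by unfold Spec_extract_seqs; infer_instance

-- ===== CLAIM (what is proved, stated in full; the proofs are below) =====
def Claim_equal_extract_seqs : Prop := ∀ (seq : String) (ints : List (List Int)), Dom_extract_seqs seq ints → Spec_extract_seqs seq ints (extract_seqs seq ints)

-- ===== LEMMAS AND PROOFS =====

-- stepping the lower bound of a strictly sorted filter by one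
lemma filter_gt_step (l : List Int) (hl : l.Pairwise (· < ·)) (i : Int) :
    l.filter (fun p => decide (i < p)) =
      (if (i + 1) ∈ l then [i + 1] else []) ++ l.filter (fun p => decide (i + 1 < p)) := by
  induction l with
  | nil => simp
  | cons p ps ih =>
    obtain ⟨h1, hps⟩ := List.pairwise_cons.mp hl
    have ihe := ih hps
    by_cases hip : i < p
    · by_cases hpe : p = i + 1
      · subst hpe
        have hall : ∀ q ∈ ps, i < q ∧ i + 1 < q := fun q hq => ⟨by have := h1 q hq; omega, h1 q hq⟩
        simp only [List.filter_cons, List.mem_cons]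
        rw [List.filter_eq_self.2 (fun q hq => by simpa using (hall q hq).1),
            List.filter_eq_self.2 (fun q hq => by simpa using (hall q hq).2)]
        simp [hip]
      · have hlt : i + 1 < p := by omega
        have hnotps : (i + 1) ∉ ps := fun h => by have := h1 _ h; omega
        have hnotm : (i + 1) ∉ p :: ps := by
          simp only [List.mem_cons]; rintro (h | h)
          · omega
          · exact hnotps h
        rw [if_neg hnotm]
        simp only [List.filter_cons, decide_eq_true_eq, if_pos hip, if_pos hlt]
        rw [ihe, if_neg hnotps]
        simp
    · have hm : ((i + 1) ∈ p :: ps) = ((i + 1) ∈ ps) := by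
        simp only [List.mem_cons, eq_iff_iff]
        constructor
        · rintro (h | h); · omega
          · exact h
        · exact Or.inr
      simp only [List.filter_cons, decide_eq_true_eq, if_neg hip, if_neg (show ¬ i + 1 < p by omega), hm]
      exact ihe

-- slicing one character off the front of a slice of `full` starting at a valid index
lemma slice_cons_drop (full : List Char) (i : Nat) (c : Char) (tl : List Char) (q : Int)
    (hd : full.drop i = c :: tl) (hq : (i : Int) < q) :
    PySem.List.slice full (some (i:Int)) (some q) = c :: PySem.List.slice full (some ((i:Int)+1)) (some q) := by
  lift q to Nat using (by omega)
  have hiq : i < q := by exact_mod_cast hq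
  have h1 : ((i:Int)+1) = ((i+1 : Nat) : Int) := by push_cast; ring
  rw [h1, PySem.List.slice_natCast, PySem.List.slice_natCast]
  have htl : full.drop (i+1) = tl := by rw [← List.tail_drop, hd]; rfl
  rw [hd, htl, show q - i = (q - (i+1)) + 1 by omega, List.take_succ_cons]

-- the empty slice full[i:i]
lemma slice_self_nil (full : List Char) (i : Nat) :
    PySem.List.slice full (some (i:Int)) (some (i:Int)) = [] := by
  rw [PySem.List.slice_natCast]
  simp

-- the scan invariant: A's fold from index i equals the pair-slices of the breakpoints past i
lemma scan_eq (bpts pos : List Int) (full : List Char)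
    (hmem : ∀ p : Int, p ∈ pos ↔ p ∈ bpts ∧ 1 ≤ p ∧ p ≤ (full.length : Int))
    (hsort : pos.Pairwise (· < ·)) :
    ∀ (cs : List Char) (i : Nat) (seqs : List String) (cur : List Char) (w : Bool),
    full.drop i = cs → (w = false → cur = []) →
    ((PySem.List.enumerate cs (i : Int)).foldl (stepA bpts) (seqs, cur, w)).1 =
      (if w then
        (match pos.filter (fun p => decide ((i : Int) < p)) with
         | [] => seqs
         | q :: rest => seqs ++ [String.ofList (cur ++ PySem.List.slice full (some (i : Int)) (some (q - 1)))] ++ pairSlices full rest)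
       else seqs ++ pairSlices full (pos.filter (fun p => decide ((i : Int) < p)))) := by
  intro cs
  induction cs with
  | nil =>
    intro i seqs cur w hdrop hcur
    have hlen : full.length ≤ i := by
      by_contra h
      have := congrArg List.length hdrop
      simp [List.length_drop] at this
      omega
    have hleni : (full.length : Int) ≤ (i : Int) := by exact_mod_cast hlen
    have hfil : pos.filter (fun p => decide ((i:Int) < p)) = [] := by
      apply List.filter_eq_nil_iff.2
      intro p hp
      have h := (hmem p).1 hp
      simp only [decide_eq_true_eq]
      omega
    rw [hfil]
    cases w <;> simp [PySem.List.enumerate_nil, pairSlices]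
  | cons c cs' ih =>
    intro i seqs cur w hdrop hcur
    have hi : i < full.length := by
      by_contra h
      rw [List.drop_eq_nil_of_le (by omega)] at hdrop
      cases hdrop
    have hdrop1 : full.drop (i+1) = cs' := by
      rw [← List.tail_drop, hdrop]; rfl
    have hleni : ((i:Int)+1) ≤ (full.length : Int) := by exact_mod_cast hi
    have hiff : (((i:Int) + 1) ∈ bpts) ↔ (((i:Int)+1) ∈ pos) := by
      rw [hmem]
      constructor
      · intro h; exact ⟨h, by omega, hleni⟩
      · exact fun h => h.1
    have hcast : ((i:Int) + 1) = (((i+1 : Nat)) : Int) := by push_cast; ring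
    rw [PySem.List.enumerate_cons, List.foldl_cons,
        filter_gt_step pos hsort (i:Int), hcast]
    by_cases hhit : (((i+1 : Nat)):Int) ∈ pos
    · have hb : ((i:Int) + 1) ∈ bpts := hiff.2 (by rw [hcast]; exact hhit)
      rw [if_pos hhit]
      cases w with
      | false =>
        have hcur0 : cur = [] := hcur rfl
        subst hcur0
        have hstep : stepA bpts (seqs, [], false) ((i:Int), c) = (seqs, [c], true) := by
          simp [stepA, hb]
        rw [hstep, ih (i+1) seqs [c] true hdrop1 (by simp)]
        cases hG : pos.filter (fun p => decide ((((i+1:Nat)):Int) < p)) with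
        | nil => simp [pairSlices]
        | cons q rest =>
          have hqmem : q ∈ pos.filter (fun p => decide ((((i+1:Nat)):Int) < p)) := by
            rw [hG]; exact List.mem_cons_self
          have hq : (((i+1:Nat)):Int) < q := by
            simpa using (List.mem_filter.1 hqmem).2
          simp only [Bool.false_eq_true, ite_true, ite_false, List.singleton_append, pairSlices]
          rw [show ((((i+1:Nat)):Int) - 1) = ((i:Nat):Int) by push_cast; ring,
              slice_cons_drop full i c cs' (q-1) hdrop (by omega), hcast]
          simp
      | true =>
        have hstep : stepA bpts (seqs, cur, true) ((i:Int), c) = (seqs ++ [String.ofList cur], [], false) := by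
          simp [stepA, hb]
        rw [hstep, ih (i+1) (seqs ++ [String.ofList cur]) [] false hdrop1 (fun _ => rfl)]
        simp only [Bool.false_eq_true, ite_true, ite_false, List.singleton_append]
        rw [show ((((i+1:Nat)):Int) - 1) = ((i:Nat):Int) by push_cast; ring, slice_self_nil]
        simp
    · have hbn : ((i:Int) + 1) ∉ bpts := fun h => hhit (by rw [← hcast]; exact hiff.1 h)
      rw [if_neg hhit]
      cases w with
      | false =>
        have hcur0 : cur = [] := hcur rfl
        subst hcur0
        have hstep : stepA bpts (seqs, [], false) ((i:Int), c) = (seqs, [], false) := by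
          simp [stepA, hbn]
        rw [hstep, ih (i+1) seqs [] false hdrop1 (fun _ => rfl)]
        simp
      | true =>
        have hstep : stepA bpts (seqs, cur, true) ((i:Int), c) = (seqs, cur ++ [c], true) := by
          simp [stepA, hbn]
        rw [hstep, ih (i+1) seqs (cur ++ [c]) true hdrop1 (by simp)]
        cases hG : pos.filter (fun p => decide ((((i+1:Nat)):Int) < p)) with
        | nil => simp
        | cons q rest =>
          have hqmem : q ∈ pos.filter (fun p => decide ((((i+1:Nat)):Int) < p)) := by
            rw [hG]; exact List.mem_cons_self
          have hq : (((i+1:Nat)):Int) < q := by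
            simpa using (List.mem_filter.1 hqmem).2
          simp only [ite_true, List.nil_append]
          rw [slice_cons_drop full i c cs' (q-1) hdrop (by push_cast at hq ⊢; omega), hcast]
          simp

-- ===== VERDICT (by name: the statement is the Claim_ definition above) =====
theorem extract_seqs_spec : Claim_equal_extract_seqs := by
  intro seq ints _
  show extract_seqs seq ints = extract_seqs_alt seq ints
  unfold extract_seqs extract_seqs_alt
  set full := seq.toList with hfull
  set bpts := ints.flatten with hbpts
  set pos := PySem.List.sorted (PySem.Set.ofList (bpts.filter (fun p => decide (1 ≤ p) && decide (p ≤ (full.length : Int))))) (fun x => x) false with hpos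
  have hmem : ∀ p : Int, p ∈ pos ↔ p ∈ bpts ∧ 1 ≤ p ∧ p ≤ (full.length : Int) := by
    intro p
    rw [hpos, PySem.List.mem_sorted, PySem.Set.mem_ofList, List.mem_filter]
    simp
  have hsort : pos.Pairwise (· < ·) := PySem.List.sorted_ofList_pairwise_lt _
  have h := scan_eq bpts pos full hmem hsort full 0 [] [] false (by simp) (fun _ => rfl)
  rw [show ((0:Nat):Int) = 0 by rfl] at h
  rw [h]
  have hfil : pos.filter (fun p => decide ((0:Int) < p)) = pos := by
    apply List.filter_eq_self.2
    intro p hp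
    have := (hmem p).1 hp
    simp only [decide_eq_true_eq]
    omega
  rw [hfil]
  simp
  rw [hpos]
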